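-- pv_equiv track=rewrite | github.com/freecraver/tweet2vec | fetchAll.py | get_equal_user_subclasses
-- ===== SOURCE A (Python) =====
-- from collections import Counter
--
-- def get_equal_user_subclasses(user_list):
--     """
--     :param user_list: list containing [<userhandle>,<category>]
--     :return: list with the first n entries for each category,
--                 where n is the amount of entries for the least common category
--     """
--     counter = Counter(u[1] for u in user_list)
--     min_cnt = counter.most_common()[-1][1]
--
--     # reset counter
--     for x in counter:
--         counter[x] = 0
--
--     # create a capped list, starting from the beginning
--     capped_list = list()
--     for u in user_list:
--         if counter[u[1]] < min_cnt:
--             capped_list.append(u)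
--             counter[u[1]] += 1
--
--     return capped_list
-- ===== SOURCE B (Python) =====
-- def get_equal_user_subclasses(user_list):
--     """
--     :param user_list: list containing [<userhandle>,<category>]
--     :return: list with the first n entries for each category,
--                 where n is the amount of entries for the least common category
--     """
--     # one pass: category -> list of positions where it occurs
--     positions = {}
--     for i, u in enumerate(user_list):
--         positions[u[1]] = positions.get(u[1], []) + [i]
--     # n = size of the smallest category
--     n = min(len(v) for v in positions.values())
--     # keep the first n positions of every category
--     selected = set()
--     for v in positions.values():
--         selected.update(v[:n])
--     return [u for i, u in enumerate(user_list) if i in selected]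
-- ===== Notes on version B (the rewrite author's own statement) =====
-- stated objective: alternative
-- what changed: Replaces Counter + most_common + a live per-category countdown counter with a single-pass category->positions index; n is the minimum index-list length and the output is the entries whose position lies in the set of each category's first n positions.
import Mathlib
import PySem

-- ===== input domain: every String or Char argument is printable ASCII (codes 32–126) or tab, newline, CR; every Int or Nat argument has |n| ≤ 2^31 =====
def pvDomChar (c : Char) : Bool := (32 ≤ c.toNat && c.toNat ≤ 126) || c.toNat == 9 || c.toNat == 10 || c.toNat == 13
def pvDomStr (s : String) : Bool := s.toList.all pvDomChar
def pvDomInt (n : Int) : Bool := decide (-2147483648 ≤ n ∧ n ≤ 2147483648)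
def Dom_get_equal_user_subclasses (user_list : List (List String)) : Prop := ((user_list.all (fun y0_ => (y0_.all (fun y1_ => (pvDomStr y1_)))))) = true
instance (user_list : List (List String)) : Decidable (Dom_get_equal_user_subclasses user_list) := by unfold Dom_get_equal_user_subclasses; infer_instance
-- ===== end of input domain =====

-- B replaces Counter/most_common plus a live countdown counter by a one-pass
-- category->positions index, n = minimum index-list length, and selection of the
-- first n positions of each category (objective: alternative decomposition).

-- ===== PORT A =====
-- u[1] (both Pythons index u[1]; Pre_ guarantees it is in range)
def pvKey (u : List String) : String := (PySem.List.pyGet? u 1).getD ""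

def get_equal_user_subclasses (user_list : List (List String)) : List (List String) :=
  -- counter = Counter(u[1] for u in user_list)
  let counter := PySem.Dict.counter (user_list.map pvKey)
  -- min_cnt = counter.most_common()[-1][1]
  let mc := PySem.List.sorted counter.items (fun p => p.2) true
  let min_cnt := (PySem.List.pyGetD mc (-1) ("", (0 : Int))).2
  -- for x in counter: counter[x] = 0
  let counter2 := counter.keys.foldl (fun d x => d.insert x (0 : Int)) counter
  -- capped_list loop
  (user_list.foldl
    (fun (st : List (List String) × PySem.Dict String Int) u =>
      if st.2.getD (pvKey u) 0 < min_cnt then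
        (st.1 ++ [u], st.2.insert (pvKey u) (st.2.getD (pvKey u) 0 + 1))
      else st)
    ([], counter2)).1

-- ===== PORT B =====
def get_equal_user_subclasses_alt (user_list : List (List String)) : List (List String) :=
  -- positions[u[1]] = positions.get(u[1], []) + [i]
  let positions := (PySem.List.enumerate user_list 0).foldl
      (fun (d : PySem.Dict String (List Int)) iu => d.modify (pvKey iu.2) [] (· ++ [iu.1]))
      PySem.Dict.empty
  -- n = min(len(v) for v in positions.values())
  let n := (PySem.List.min? (positions.values.map (fun v => (v.length : Int))) (fun x => x)).getD 0
  -- selected = set(); for v in positions.values(): selected.update(v[:n])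
  let selected := positions.values.foldl
      (fun (s : PySem.Set Int) v => PySem.Set.update s (PySem.List.slice v none (some n)))
      PySem.Set.empty
  -- [u for i, u in enumerate(user_list) if i in selected]
  ((PySem.List.enumerate user_list 0).filter (fun iu => PySem.Set.contains selected iu.1)).map (·.2)

-- ===== PRECONDITION & SPEC =====
-- Pre_ excludes exactly the inputs where the Python A raises: the empty list
-- (most_common()[-1] is an IndexError) and entries u with len(u) < 2 (u[1] IndexError).
def Pre_get_equal_user_subclasses (user_list : List (List String)) : Prop :=
  user_list ≠ [] ∧ ∀ u ∈ user_list, 2 ≤ u.length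
instance (user_list : List (List String)) : Decidable (Pre_get_equal_user_subclasses user_list) := by
  unfold Pre_get_equal_user_subclasses; infer_instance

def pvWitness_get_equal_user_subclasses : List (List String) :=
  [["a", "x"], ["b", "y"], ["c", "x"]]

def Spec_get_equal_user_subclasses (user_list : List (List String)) (out : List (List String)) : Prop := out = get_equal_user_subclasses_alt user_list
instance (user_list : List (List String)) (out : List (List String)) : Decidable (Spec_get_equal_user_subclasses user_list out) := by unfold Spec_get_equal_user_subclasses; infer_instance

-- ===== CLAIM (what is proved, stated in full; the proofs are below) =====
def Claim_equal_get_equal_user_subclasses : Prop := ∀ (user_list : List (List String)), Dom_get_equal_user_subclasses user_list → Pre_get_equal_user_subclasses user_list → Spec_get_equal_user_subclasses user_list (get_equal_user_subclasses user_list)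

-- ===== LEMMAS AND PROOFS =====

-- counts after bumping key k once
def pvBump (c : String → Int) (k : String) : String → Int :=
  fun k' => if k' = k then c k + 1 else c k'

-- reference: keep an entry while its category's running count is below m
def pvRF (m : Int) : List (List String) → (String → Int) → List (List String)
  | [], _ => []
  | u :: t, c =>
    if c (pvKey u) < m then u :: pvRF m t (pvBump c (pvKey u)) else pvRF m t c

-- positions (starting at s) of the entries with key k
def pvIdx (k : String) (s : Int) : List (List String) → List Int
  | [] => []
  | u :: t => (if pvKey u = k then [s] else []) ++ pvIdx k (s + 1) t

-- ---- A-side ----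

lemma pvReset_getD (l : List String) (d : PySem.Dict String Int) (k : String) :
    (l.foldl (fun d x => d.insert x (0 : Int)) d).getD k 0
      = if k ∈ l then 0 else d.getD k 0 := by
  induction l generalizing d with
  | nil => simp
  | cons a t ih =>
    simp only [List.foldl_cons, ih, PySem.Dict.getD_insert, List.mem_cons]
    by_cases h1 : k ∈ t <;> by_cases h2 : k = a <;> simp [h1, h2]

lemma pvA_loop (m : Int) (l : List (List String)) (acc : List (List String))
    (d : PySem.Dict String Int) :
    (l.foldl
      (fun (st : List (List String) × PySem.Dict String Int) u =>
        if st.2.getD (pvKey u) 0 < m then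
          (st.1 ++ [u], st.2.insert (pvKey u) (st.2.getD (pvKey u) 0 + 1))
        else st)
      (acc, d)).1 = acc ++ pvRF m l (fun k => d.getD k 0) := by
  induction l generalizing acc d with
  | nil => simp [pvRF]
  | cons u t ih =>
    simp only [List.foldl_cons, pvRF]
    split_ifs with h
    · rw [ih]
      have hb : (fun k => (d.insert (pvKey u) (d.getD (pvKey u) 0 + 1)).getD k 0)
          = pvBump (fun k => d.getD k 0) (pvKey u) := by
        funext k; simp [PySem.Dict.getD_insert, pvBump]
      rw [hb, List.append_assoc]; rfl
    · exact ih acc d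

-- ---- generic facts about pvIdx / enumerate ----

lemma pvIdx_lb (k : String) (l : List (List String)) (s j : Int)
    (h : j ∈ pvIdx k s l) : s ≤ j := by
  induction l generalizing s with
  | nil => simp [pvIdx] at h
  | cons u t ih =>
    simp only [pvIdx, List.mem_append] at h
    rcases h with h | h
    · split at h <;> simp_all
    · have := ih (s + 1) h; omega

lemma pvIdx_length (k : String) (l : List (List String)) (s : Int) :
    (pvIdx k s l).length = l.countP (fun u => pvKey u = k) := by
  induction l generalizing s with
  | nil => simp [pvIdx]
  | cons u t ih =>
    simp only [pvIdx, List.length_append, ih, List.countP_cons]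
    split <;> simp_all <;> omega

lemma pvIdx_key (l : List (List String)) (s j : Int) (k k' : String)
    (h : j ∈ pvIdx k s l) (h' : j ∈ pvIdx k' s l) : k = k' := by
  induction l generalizing s with
  | nil => simp [pvIdx] at h
  | cons u t ih =>
    simp only [pvIdx, List.mem_append] at h h'
    rcases h with h | h <;> rcases h' with h' | h'
    · split at h <;> split at h' <;> simp_all
    · exfalso
      split at h <;> simp_all
      have := pvIdx_lb k' t (s + 1) s h'; omega
    · exfalso
      split at h' <;> simp_all
      have := pvIdx_lb k t (s + 1) s h; omega
    · exact ih (s + 1) h h'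

lemma pvEnum_lb (l : List (List String)) (s : Int) (iu : Int × List String)
    (h : iu ∈ PySem.List.enumerate l s) : s ≤ iu.1 := by
  induction l generalizing s with
  | nil => simp [PySem.List.enumerate] at h
  | cons u t ih =>
    rw [PySem.List.enumerate_cons] at h
    rcases List.mem_cons.mp h with h | h
    · subst h; simp
    · have := ih (s + 1) h; omega

lemma pvEnum_mem_idx (l : List (List String)) (s : Int) (iu : Int × List String)
    (h : iu ∈ PySem.List.enumerate l s) : iu.1 ∈ pvIdx (pvKey iu.2) s l := by
  induction l generalizing s with
  | nil => simp [PySem.List.enumerate] at h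
  | cons u t ih =>
    rw [PySem.List.enumerate_cons] at h
    rcases List.mem_cons.mp h with h | h
    · subst h; simp [pvIdx]
    · simp only [pvIdx, List.mem_append]
      exact Or.inr (ih (s + 1) h)

-- ---- the central induction: local-take filtering computes pvRF ----

set_option maxHeartbeats 1000000 in
lemma pvMain (n : Int) (l : List (List String)) (s : Int) (c : String → Int) :
    ((PySem.List.enumerate l s).filter
        (fun iu => decide (iu.1 ∈ (pvIdx (pvKey iu.2) s l).take (n - c (pvKey iu.2)).toNat))).map (·.2)
      = pvRF n l c := by
  induction l generalizing s c with
  | nil => simp [PySem.List.enumerate, pvRF]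
  | cons u t ih =>
    rw [PySem.List.enumerate_cons]
    have hhead : pvIdx (pvKey u) s (u :: t) = s :: pvIdx (pvKey u) (s + 1) t := by
      simp [pvIdx]
    have hne_idx : ∀ (iu : Int × List String), pvKey iu.2 ≠ pvKey u →
        pvIdx (pvKey iu.2) s (u :: t) = pvIdx (pvKey iu.2) (s + 1) t := by
      intro iu hk
      simp only [pvIdx, if_neg (fun h => hk (Eq.symm h)), List.nil_append]
    by_cases h : c (pvKey u) < n
    · have hcp : s ∈ (pvIdx (pvKey u) s (u :: t)).take (n - c (pvKey u)).toNat := by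
        rw [hhead]
        obtain ⟨m', hm'⟩ : ∃ m', (n - c (pvKey u)).toNat = m' + 1 :=
          ⟨(n - c (pvKey u)).toNat - 1, by omega⟩
        simp [hm']
      have htail : ((PySem.List.enumerate t (s + 1)).filter
          (fun iu => decide (iu.1 ∈ (pvIdx (pvKey iu.2) s (u :: t)).take (n - c (pvKey iu.2)).toNat)))
          = ((PySem.List.enumerate t (s + 1)).filter
          (fun iu => decide (iu.1 ∈ (pvIdx (pvKey iu.2) (s + 1) t).take (n - (pvBump c (pvKey u)) (pvKey iu.2)).toNat))) := by
        apply List.filter_congr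
        intro iu hiu
        have hlb : s + 1 ≤ iu.1 := pvEnum_lb t (s + 1) iu hiu
        by_cases hk : pvKey iu.2 = pvKey u
        · rw [hk]
          have hb : pvBump c (pvKey u) (pvKey u) = c (pvKey u) + 1 := by simp [pvBump]
          rw [hb, hhead]
          obtain ⟨m', hm'⟩ : ∃ m', (n - c (pvKey u)).toNat = m' + 1 :=
            ⟨(n - c (pvKey u)).toNat - 1, by omega⟩
          have hm'' : (n - (c (pvKey u) + 1)).toNat = m' := by omega
          rw [hm', hm'', List.take_succ_cons]
          have hne : iu.1 ≠ s := by omega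
          simp [hne]
        · have hb : pvBump c (pvKey u) (pvKey iu.2) = c (pvKey iu.2) := by
            simp [pvBump, hk]
          rw [hne_idx iu hk, hb]
      simp only [List.filter_cons, hcp, decide_true, if_true, List.map_cons]
      rw [htail, ih (s + 1) (pvBump c (pvKey u))]
      simp only [pvRF, if_pos h]
    · have hcn : ¬ (s ∈ (pvIdx (pvKey u) s (u :: t)).take (n - c (pvKey u)).toNat) := by
        have h0 : (n - c (pvKey u)).toNat = 0 := by omega
        simp [h0]
      have htail' : ((PySem.List.enumerate t (s + 1)).filter
          (fun iu => decide (iu.1 ∈ (pvIdx (pvKey iu.2) s (u :: t)).take (n - c (pvKey iu.2)).toNat)))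
          = ((PySem.List.enumerate t (s + 1)).filter
          (fun iu => decide (iu.1 ∈ (pvIdx (pvKey iu.2) (s + 1) t).take (n - c (pvKey iu.2)).toNat))) := by
        apply List.filter_congr
        intro iu hiu
        by_cases hk : pvKey iu.2 = pvKey u
        · rw [hk]
          have h0 : (n - c (pvKey u)).toNat = 0 := by omega
          simp [h0]
        · rw [hne_idx iu hk]
      simp only [List.filter_cons, hcn, decide_false, Bool.false_eq_true, if_false]
      rw [htail', ih (s + 1) c]
      simp only [pvRF, if_neg h]

-- ---- B-side ----

def pvPositions (ul : List (List String)) : PySem.Dict String (List Int) :=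
  (PySem.List.enumerate ul 0).foldl
    (fun (d : PySem.Dict String (List Int)) iu => d.modify (pvKey iu.2) [] (· ++ [iu.1]))
    PySem.Dict.empty

def pvN (ul : List (List String)) : Int :=
  ((PySem.List.min? ((pvPositions ul).values.map (fun v => (v.length : Int))) (fun x => x)).getD 0)

-- the category counts, as the multiset both programs take the minimum of
def pvM (ul : List (List String)) : List Int :=
  (PySem.Set.ofList (ul.map pvKey)).map (fun k => (((ul.map pvKey).count k : Int)))

def pvMinA (ul : List (List String)) : Int :=
  (PySem.List.pyGetD
    (PySem.List.sorted (PySem.Dict.counter (ul.map pvKey)).items (fun p => p.2) true)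
    (-1) ("", (0 : Int))).2

lemma pvFilterMap (k : String) (l : List (List String)) (s : Int) :
    (((PySem.List.enumerate l s).map (fun iu => (pvKey iu.2, iu.1))).filter
        (fun p => p.1 == k)).map (·.2) = pvIdx k s l := by
  induction l generalizing s with
  | nil => simp [PySem.List.enumerate, pvIdx]
  | cons u t ih =>
    rw [PySem.List.enumerate_cons]
    simp only [List.map_cons, List.filter_cons]
    by_cases hk : pvKey u = k
    · simp [hk, pvIdx, ih]
    · simp [hk, pvIdx, ih]

lemma pvPositions_getD (ul : List (List String)) (k : String) :
    (pvPositions ul).getD k [] = pvIdx k 0 ul := by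
  unfold pvPositions
  rw [← List.foldl_map (f := fun (iu : Int × List String) => (pvKey iu.2, iu.1))
        (g := fun (d : PySem.Dict String (List Int)) p => d.modify p.1 [] (· ++ [p.2]))]
  rw [PySem.Dict.getD_foldl_modify_append]
  rw [pvFilterMap]
  simp [PySem.Dict.getD_empty]

lemma pvPositions_keys (ul : List (List String)) :
    (pvPositions ul).keys = PySem.Set.ofList (ul.map pvKey) := by
  unfold pvPositions
  rw [PySem.Dict.keys_foldl_modify_key]
  have h1 : (PySem.List.enumerate ul 0).map (fun iu => pvKey iu.2) = ul.map pvKey := by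
    conv_rhs => rw [← PySem.List.map_snd_enumerate ul 0]
    rw [List.map_map]
    rfl
  rw [h1]
  simp [PySem.Set.update_nil_left, PySem.Dict.keys_empty]

lemma pvPositions_nodup (ul : List (List String)) : (pvPositions ul).keys.Nodup := by
  unfold pvPositions
  exact PySem.Dict.nodup_keys_foldl_modify_key _ _ _ _ _ PySem.Dict.nodup_keys_empty

lemma pvPositions_values (ul : List (List String)) :
    (pvPositions ul).values = (PySem.Set.ofList (ul.map pvKey)).map (fun k => pvIdx k 0 ul) := by
  rw [PySem.Dict.values_eq_map_keys _ (pvPositions_nodup ul) [], pvPositions_keys]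
  exact List.map_congr_left (fun k _ => pvPositions_getD ul k)

lemma pvSel_mem (nn : Int) (vs : List (List Int)) (s0 : PySem.Set Int) (x : Int) :
    x ∈ vs.foldl (fun s v => PySem.Set.update s (PySem.List.slice v none (some nn))) s0
      ↔ x ∈ s0 ∨ ∃ v ∈ vs, x ∈ PySem.List.slice v none (some nn) := by
  induction vs generalizing s0 with
  | nil => simp
  | cons a t ih =>
    simp only [List.foldl_cons, ih, PySem.Set.mem_update, List.mem_cons]
    constructor
    · rintro ((h | h) | ⟨v, hv, hx⟩)
      · exact Or.inl h
      · exact Or.inr ⟨a, Or.inl rfl, h⟩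
      · exact Or.inr ⟨v, Or.inr hv, hx⟩
    · rintro (h | ⟨v, (rfl | hv), hx⟩)
      · exact Or.inl (Or.inl h)
      · exact Or.inl (Or.inr hx)
      · exact Or.inr ⟨v, hv, hx⟩

lemma pvN_nonneg (ul : List (List String)) : 0 ≤ pvN ul := by
  unfold pvN
  cases hmin : PySem.List.min? ((pvPositions ul).values.map (fun v => (v.length : Int))) (fun x => x) with
  | none => simp
  | some m =>
    have hm := PySem.List.min?_mem hmin
    obtain ⟨v, _, hv⟩ := List.mem_map.mp hm
    simp only [Option.getD_some]
    omega

lemma pvB_eq (ul : List (List String)) :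
    get_equal_user_subclasses_alt ul = pvRF (pvN ul) ul (fun _ => 0) := by
  unfold get_equal_user_subclasses_alt
  dsimp only
  rw [show (PySem.List.enumerate ul 0).foldl
      (fun (d : PySem.Dict String (List Int)) iu => d.modify (pvKey iu.2) [] (· ++ [iu.1]))
      PySem.Dict.empty = pvPositions ul from rfl]
  rw [show ((PySem.List.min? ((pvPositions ul).values.map (fun v => (v.length : Int))) (fun x => x)).getD 0) = pvN ul from rfl]
  rw [← pvMain (pvN ul) ul 0 (fun _ => 0)]
  refine congrArg _ (List.filter_congr ?_)
  intro iu hiu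
  rw [Bool.eq_iff_iff]
  simp only [PySem.Set.contains_iff, decide_eq_true_eq]
  rw [pvSel_mem]
  have hvals := pvPositions_values ul
  have hslice : ∀ v : List Int, PySem.List.slice v none (some (pvN ul)) = v.take (pvN ul).toNat :=
    fun v => PySem.List.slice_to v (pvN_nonneg ul)
  have hmemidx : iu.1 ∈ pvIdx (pvKey iu.2) 0 ul := pvEnum_mem_idx ul 0 iu hiu
  have hsub : (pvN ul - (0 : Int)) = pvN ul := by ring
  constructor
  · rintro (h | ⟨v, hv, hx⟩)
    · simp at h
    · rw [hvals] at hv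
      obtain ⟨k, hk, rfl⟩ := List.mem_map.mp hv
      rw [hslice] at hx
      have hxin : iu.1 ∈ pvIdx k 0 ul := List.mem_of_mem_take hx
      have := pvIdx_key ul 0 iu.1 k (pvKey iu.2) hxin hmemidx
      subst this
      rw [hsub]
      exact hx
  · intro hx
    right
    refine ⟨pvIdx (pvKey iu.2) 0 ul, ?_, ?_⟩
    · rw [hvals]
      refine List.mem_map.mpr ⟨pvKey iu.2, ?_, rfl⟩
      refine (PySem.Set.mem_ofList _ _).mpr ?_
      have : iu.2 ∈ ul := by
        rw [← PySem.List.map_snd_enumerate ul 0]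
        exact List.mem_map_of_mem hiu
      exact List.mem_map_of_mem this
    · rw [hslice, ← hsub]
      exact hx

-- ---- the minimum is the same on both sides ----

lemma pvM_count (ul : List (List String)) (k : String) :
    ((ul.map pvKey).count k : Int) = ((pvIdx k 0 ul).length : Int) := by
  rw [pvIdx_length]
  congr 1
  rw [List.count_eq_countP, List.countP_map]
  apply List.countP_congr
  intro u _
  by_cases h : pvKey u = k <;> simp [h]

lemma pvMinA_spec (ul : List (List String)) (hne : ul ≠ []) :
    pvMinA ul ∈ pvM ul ∧ ∀ x ∈ pvM ul, pvMinA ul ≤ x := by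
  have hitems : (PySem.Dict.counter (ul.map pvKey)).items
      = (PySem.Set.ofList (ul.map pvKey)).map (fun k => (k, (((ul.map pvKey).count k : Int)))) :=
    PySem.Dict.items_counter _
  have hkne : PySem.Set.ofList (ul.map pvKey) ≠ [] := by
    cases ul with
    | nil => exact absurd rfl hne
    | cons u t =>
      apply List.ne_nil_of_mem (a := pvKey u)
      exact (PySem.Set.mem_ofList _ _).mpr (List.mem_map_of_mem (by simp))
  have hitne : (PySem.Dict.counter (ul.map pvKey)).items ≠ [] := by
    rw [hitems]
    simpa using hkne
  have hmcne : PySem.List.sorted (PySem.Dict.counter (ul.map pvKey)).items (fun p => p.2) true ≠ [] := by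
    intro hnil
    exact hitne ((PySem.List.sorted_eq_nil_iff _ _ _).mp hnil)
  obtain ⟨t', p, hconcat⟩ :
      ∃ t' p, PySem.List.sorted (PySem.Dict.counter (ul.map pvKey)).items (fun p => p.2) true = t' ++ [p] := by
    rcases List.eq_nil_or_concat (PySem.List.sorted (PySem.Dict.counter (ul.map pvKey)).items (fun p => p.2) true) with h | ⟨L, b, h⟩
    · exact absurd h hmcne
    · exact ⟨L, b, by simpa using h⟩
  have hA : pvMinA ul = p.2 := by
    unfold pvMinA
    rw [hconcat]
    rw [PySem.List.pyGetD_neg_one_append_singleton t' p ("", (0 : Int))]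
  have hpmem : p ∈ (PySem.Dict.counter (ul.map pvKey)).items := by
    have hp0 : p ∈ t' ++ [p] := by simp
    rw [← hconcat] at hp0
    exact (PySem.List.mem_sorted _ _ _ _).mp hp0
  have hpair := PySem.List.sorted_pairwise_rev (PySem.Dict.counter (ul.map pvKey)).items (fun p => p.2)
  have hlb : ∀ q ∈ PySem.List.sorted (PySem.Dict.counter (ul.map pvKey)).items (fun p => p.2) true,
      p.2 ≤ q.2 := by
    rw [hconcat] at hpair ⊢
    intro q hq
    rcases List.mem_append.mp hq with hq | hq
    · exact (List.pairwise_append.mp hpair).2.2 q hq p (by simp)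
    · simp at hq
      simp [hq]
  constructor
  · rw [hA]
    rw [hitems] at hpmem
    obtain ⟨k, hk, heq⟩ := List.mem_map.mp hpmem
    rw [← heq]
    exact List.mem_map.mpr ⟨k, hk, rfl⟩
  · intro x hx
    obtain ⟨k, hk, hxk⟩ := List.mem_map.mp hx
    have hmem : (k, x) ∈ (PySem.Dict.counter (ul.map pvKey)).items := by
      rw [hitems]
      exact List.mem_map.mpr ⟨k, hk, by rw [hxk]⟩
    have hmem' : (k, x) ∈ PySem.List.sorted (PySem.Dict.counter (ul.map pvKey)).items (fun p => p.2) true :=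
      (PySem.List.mem_sorted _ _ _ _).mpr hmem
    rw [hA]
    exact hlb (k, x) hmem'

lemma pvMvals (ul : List (List String)) :
    (pvPositions ul).values.map (fun v => (v.length : Int)) = pvM ul := by
  rw [pvPositions_values, List.map_map]
  unfold pvM
  refine List.map_congr_left (fun k _ => ?_)
  simp only [Function.comp]
  exact (pvM_count ul k).symm

lemma pvMin_eq (ul : List (List String)) (hne : ul ≠ []) : pvMinA ul = pvN ul := by
  obtain ⟨hAmem, hAlb⟩ := pvMinA_spec ul hne
  have hMne : pvM ul ≠ [] := List.ne_nil_of_mem hAmem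
  unfold pvN
  rw [pvMvals]
  cases hmin : PySem.List.min? (pvM ul) (fun x => x) with
  | none => exact absurd ((PySem.List.min?_eq_none_iff _ _).mp hmin) hMne
  | some n0 =>
    have hn0mem := PySem.List.min?_mem hmin
    have hn0lb := PySem.List.min?_isMin hmin
    simp only [Option.getD_some]
    exact le_antisymm (hAlb n0 hn0mem) (hn0lb _ hAmem)

-- ---- A-side assembly ----

lemma pvA_eq (ul : List (List String)) :
    get_equal_user_subclasses ul = pvRF (pvMinA ul) ul (fun _ => 0) := by
  unfold get_equal_user_subclasses
  rw [pvA_loop]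
  have hz : (fun k => (((PySem.Dict.counter (ul.map pvKey)).keys.foldl
        (fun d x => d.insert x (0 : Int)) (PySem.Dict.counter (ul.map pvKey))).getD k 0))
      = fun _ => (0 : Int) := by
    funext k
    rw [pvReset_getD]
    split_ifs with hk
    · rfl
    · have hcf : (PySem.Dict.counter (ul.map pvKey)).contains k = false := by
        rw [← Bool.not_eq_true, PySem.Dict.contains_iff_mem_keys]
        exact hk
      exact PySem.Dict.getD_of_not_contains _ 0 hcf
  rw [hz]
  rfl

-- ===== VERDICT (by name: the statement is the Claim_ definition above) =====
theorem get_equal_user_subclasses_spec : Claim_equal_get_equal_user_subclasses := by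
  intro ul hdom hpre
  unfold Spec_get_equal_user_subclasses
  obtain ⟨hne, -⟩ := hpre
  rw [pvA_eq, pvMin_eq ul hne, pvB_eq]
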